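-- pv_equiv track=rewrite | github.com/pepze21/Coding_practice_Programers | kweodeuapchuk_hu_gaesu_seki_lv2.py | solution
-- ===== SOURCE A (Python) =====
-- def solution(arr):
--     m = len(arr)
--     ones = sum(map(sum, arr))
--     answer = [m**2 - ones, ones]
--
--     while (m > 1):
--         arr_next = [[-9999999] * (m//2) for _ in range(m//2)]
--         for i in range(m//2):
--             for j in range(m//2):
--                 s = 0
--                 for k in range(2):
--                     for l in range(2):
--                         s += arr[2*i + k][2*j + l]
--                 if s == 0:
--                     arr_next[i][j] = 0
--                     answer[0] -= 3
--                 if s == 4: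
--                     arr_next[i][j] = 1
--                     answer[1] -= 3
--         arr = arr_next
--         m //= 2
--     return answer
-- ===== SOURCE B (Python) =====
-- def solution(arr):
--     m = len(arr)
--     ones = sum(map(sum, arr))
--     zeros = m * m - ones
--
--     def val(i, j, t):
--         if t == 0:
--             return arr[i][j]
--         s = (val(2*i, 2*j, t-1) + val(2*i, 2*j+1, t-1)
--              + val(2*i+1, 2*j, t-1) + val(2*i+1, 2*j+1, t-1))
--         if s == 0:
--             return 0
--         if s == 4:
--             return 1
--         return -9999999
--
--     t, size = 1, m // 2
--     while size >= 1:
--         for i in range(size):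
--             for j in range(size):
--                 v = val(i, j, t)
--                 if v == 0:
--                     zeros -= 3
--                 elif v == 1:
--                     ones -= 3
--         t += 1
--         size //= 2
--     return [zeros, ones]
-- ===== Notes on version B (the rewrite author's own statement) =====
-- stated objective: alternative
-- what changed: B never materialises A's compressed half-size intermediate grids: it recomputes each level's merged cell value on demand by a memoless top-down recursion over the original array, keeping only the two counters.
import Mathlib
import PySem

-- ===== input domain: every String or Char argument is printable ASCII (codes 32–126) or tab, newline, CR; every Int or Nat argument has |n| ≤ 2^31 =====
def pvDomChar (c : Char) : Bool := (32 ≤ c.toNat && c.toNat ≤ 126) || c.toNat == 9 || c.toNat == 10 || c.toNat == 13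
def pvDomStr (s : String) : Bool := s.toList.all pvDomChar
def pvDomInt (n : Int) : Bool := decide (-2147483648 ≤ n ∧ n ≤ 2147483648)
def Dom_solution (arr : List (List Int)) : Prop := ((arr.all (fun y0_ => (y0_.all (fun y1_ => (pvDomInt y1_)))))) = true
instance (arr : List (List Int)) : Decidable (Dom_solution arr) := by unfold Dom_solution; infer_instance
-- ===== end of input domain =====

-- B never materialises A's compressed half-size grids: it recomputes each level's merged
-- cell value by a memoless top-down recursion over the original array, keeping only counters.

-- ===== PORT A =====
-- shared indexing helper: arr[i][j]; exact for in-range indices (Pre_ guarantees in-range,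
-- out of range Python raises IndexError)
def gget (arr : List (List Int)) (i j : Nat) : Int := (arr.getD i []).getD j 0

-- Python's sum over a list
def pySum (l : List Int) : Int := l.foldl (· + ·) 0

-- s accumulated by the k,l loops over the 2×2 block at (2i,2j)
def blockSum (arr : List (List Int)) (i j : Nat) : Int :=
  (List.range 2).foldl (fun s k =>
    (List.range 2).foldl (fun s l => s + gget arr (2*i+k) (2*j+l)) s) 0

-- inner j-loop: builds row i of arr_next and updates answer
def solRow (arr : List (List Int)) (hm i : Nat) (zo : Int × Int) : List Int × Int × Int :=
  (List.range hm).foldl (fun racc j =>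
    let s := blockSum arr i j
    (racc.1 ++ [if s = 0 then 0 else if s = 4 then 1 else (-9999999 : Int)],
     (if s = 0 then racc.2.1 - 3 else racc.2.1),
     (if s = 4 then racc.2.2 - 3 else racc.2.2))) ([], zo.1, zo.2)

-- outer i-loop of one while-iteration: arr_next and the updated answer
def solStep (arr : List (List Int)) (hm : Nat) (zo : Int × Int) : List (List Int) × Int × Int :=
  (List.range hm).foldl (fun acc i =>
    let r := solRow arr hm i (acc.2.1, acc.2.2)
    (acc.1 ++ [r.1], r.2)) ([], zo.1, zo.2)

-- the while (m > 1) loop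
def solLoop (arr : List (List Int)) (m : Nat) (zo : Int × Int) : Int × Int :=
  if 1 < m then
    let st := solStep arr (m / 2) zo
    solLoop st.1 (m / 2) st.2
  else zo
termination_by m
decreasing_by exact Nat.div_lt_self (by omega) (by omega)

def solution (arr : List (List Int)) : List Int :=
  let m := arr.length
  let ones := pySum (arr.map pySum)
  let ans := solLoop arr m ((m : Int) ^ 2 - ones, ones)
  [ans.1, ans.2]

-- ===== PORT B =====
-- merged value of the level-t cell (i,j) (Python's recursive val)
def valB (arr : List (List Int)) (i j : Nat) : Nat → Int
  | 0 => gget arr i j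
  | t+1 =>
      let s := valB arr (2*i) (2*j) t + valB arr (2*i) (2*j+1) t
        + valB arr (2*i+1) (2*j) t + valB arr (2*i+1) (2*j+1) t
      if s = 0 then 0 else if s = 4 then 1 else -9999999

-- the i,j loops of one while-iteration (counter updates for level t)
def countCells (arr : List (List Int)) (t size : Nat) (zo : Int × Int) : Int × Int :=
  (List.range size).foldl (fun zo i =>
    (List.range size).foldl (fun zo j =>
      let v := valB arr i j t
      if v = 0 then (zo.1 - 3, zo.2) else if v = 1 then (zo.1, zo.2 - 3) else zo) zo) zo

-- the while (size >= 1) loop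
def countLoop (arr : List (List Int)) (t size : Nat) (zo : Int × Int) : Int × Int :=
  if 1 ≤ size then
    countLoop arr (t+1) (size / 2) (countCells arr t size zo)
  else zo
termination_by size
decreasing_by exact Nat.div_lt_self (by omega) (by omega)

def solution_alt (arr : List (List Int)) : List Int :=
  let m := arr.length
  let ones := pySum (arr.map pySum)
  let zeros := (m : Int) * m - ones
  let zo := countLoop arr 1 (m / 2) (zeros, ones)
  [zo.1, zo.2]

-- ===== PRECONDITION & SPEC =====
-- Pre_ excludes exactly the inputs on which A raises IndexError: A reads arr[r][c] for all
-- r,c < 2*(len(arr)//2), so each of those rows must be at least that long.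
def Pre_solution (arr : List (List Int)) : Prop :=
  ∀ row ∈ arr.take (2 * (arr.length / 2)), 2 * (arr.length / 2) ≤ row.length
instance (arr : List (List Int)) : Decidable (Pre_solution arr) := by
  unfold Pre_solution; infer_instance

def pvWitness_solution : List (List Int) := [[0, 1], [1, 1]]

def Spec_solution (arr : List (List Int)) (out : List Int) : Prop := out = solution_alt arr
instance (arr : List (List Int)) (out : List Int) : Decidable (Spec_solution arr out) := by
  unfold Spec_solution; infer_instance

-- ===== CLAIM (what is proved, stated in full; the proofs are below) =====
def Claim_equal_solution : Prop :=
  ∀ (arr : List (List Int)), Dom_solution arr → Pre_solution arr → Spec_solution arr (solution arr)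

-- ===== LEMMAS AND PROOFS =====

-- ---- the function-grid model ----
def gf (arr : List (List Int)) : Nat → Nat → Int := fun i j => gget arr i j
def bs (f : Nat → Nat → Int) (i j : Nat) : Int :=
  f (2*i) (2*j) + f (2*i) (2*j+1) + f (2*i+1) (2*j) + f (2*i+1) (2*j+1)
def stepF (f : Nat → Nat → Int) : Nat → Nat → Int := fun i j =>
  if bs f i j = 0 then 0 else if bs f i j = 4 then 1 else -9999999

def Z2 (f : Nat → Nat → Int) (h : Nat) : Int :=
  ∑ i ∈ Finset.range h, ∑ j ∈ Finset.range h, if bs f i j = 0 then (1 : Int) else 0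
def O2 (f : Nat → Nat → Int) (h : Nat) : Int :=
  ∑ i ∈ Finset.range h, ∑ j ∈ Finset.range h, if bs f i j = 4 then (1 : Int) else 0

def loopF (f : Nat → Nat → Int) (m : Nat) (zo : Int × Int) : Int × Int :=
  if 1 < m then
    loopF (stepF f) (m / 2) (zo.1 - 3 * Z2 f (m / 2), zo.2 - 3 * O2 f (m / 2))
  else zo
termination_by m
decreasing_by exact Nat.div_lt_self (by omega) (by omega)

def EqOn (f g : Nat → Nat → Int) (n : Nat) : Prop := ∀ i j, i < n → j < n → f i j = g i j

-- ---- generic fold lemmas ----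
theorem foldl_add_gen {a : Type} (l : List a) (v : a → Int) (s0 : Int) :
    l.foldl (fun s x => s + v x) s0 = s0 + (l.map v).sum := by
  induction l generalizing s0 with
  | nil => simp
  | cons x t ih => simp [ih, add_assoc]

theorem map_range_sum (n : Nat) (d : Nat → Int) :
    ((List.range n).map d).sum = ∑ i ∈ Finset.range n, d i := by
  induction n with
  | zero => simp
  | succ k ih => simp [List.range_succ, Finset.sum_range_succ, ih]

theorem foldl2_sum (v : Nat → Nat → Int) (n : Nat) (s0 : Int) :
    (List.range n).foldl (fun s r => (List.range n).foldl (fun s c => s + v r c) s) s0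
      = s0 + ∑ r ∈ Finset.range n, ∑ c ∈ Finset.range n, v r c := by
  have h : (fun (s : Int) (r : Nat) => (List.range n).foldl (fun s c => s + v r c) s)
      = fun s r => s + ∑ c ∈ Finset.range n, v r c := by
    funext s r; rw [foldl_add_gen, map_range_sum]
  rw [h, foldl_add_gen, map_range_sum]

theorem blockSum_eq (arr : List (List Int)) (i j : Nat) :
    blockSum arr i j = bs (gf arr) i j := by
  unfold blockSum
  rw [foldl2_sum (fun k l => gget arr (2*i+k) (2*j+l)) 2 0]
  simp [bs, gf, Finset.sum_range_succ]
  ring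

def cellA (arr : List (List Int)) (i j : Nat) : Int :=
  if blockSum arr i j = 0 then 0 else if blockSum arr i j = 4 then 1 else -9999999

theorem solRow_aux (arr : List (List Int)) (i : Nat) (l : List Nat) (a0 : List Int) (z o : Int) :
    l.foldl (fun racc j =>
        let s := blockSum arr i j
        (racc.1 ++ [if s = 0 then 0 else if s = 4 then 1 else (-9999999 : Int)],
         (if s = 0 then racc.2.1 - 3 else racc.2.1),
         (if s = 4 then racc.2.2 - 3 else racc.2.2))) (a0, z, o)
      = (a0 ++ l.map (fun j => cellA arr i j),
         z - (l.map (fun j => if blockSum arr i j = 0 then (3:Int) else 0)).sum,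
         o - (l.map (fun j => if blockSum arr i j = 4 then (3:Int) else 0)).sum) := by
  induction l generalizing a0 z o with
  | nil => simp
  | cons a t ih =>
      simp only [List.foldl_cons, List.map_cons, List.sum_cons]
      rw [ih]
      refine Prod.ext ?_ (Prod.ext ?_ ?_)
      · simp [cellA]
      · simp only []; split_ifs <;> ring
      · simp only []; split_ifs <;> ring

theorem solRow_eq (arr : List (List Int)) (hm i : Nat) (zo : Int × Int) :
    solRow arr hm i zo
      = ((List.range hm).map (fun j => cellA arr i j),
         zo.1 - ∑ j ∈ Finset.range hm, (if blockSum arr i j = 0 then (3:Int) else 0),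
         zo.2 - ∑ j ∈ Finset.range hm, (if blockSum arr i j = 4 then (3:Int) else 0)) := by
  unfold solRow
  rw [solRow_aux, map_range_sum, map_range_sum]
  simp

theorem foldl_rows {b : Type} (l : List Nat) (R : Nat → b) (E1 E2 : Nat → Int)
    (a0 : List b) (z o : Int) :
    l.foldl (fun acc i => (acc.1 ++ [R i], acc.2.1 - E1 i, acc.2.2 - E2 i)) (a0, z, o)
      = (a0 ++ l.map R, z - (l.map E1).sum, o - (l.map E2).sum) := by
  induction l generalizing a0 z o with
  | nil => simp
  | cons a t ih =>
      simp only [List.foldl_cons, List.map_cons, List.sum_cons]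
      rw [ih]
      refine Prod.ext ?_ (Prod.ext ?_ ?_)
      · simp
      · simp only []; ring
      · simp only []; ring

theorem solStep_eq (arr : List (List Int)) (hm : Nat) (zo : Int × Int) :
    solStep arr hm zo
      = ((List.range hm).map (fun i => (List.range hm).map (fun j => cellA arr i j)),
         zo.1 - 3 * Z2 (gf arr) hm, zo.2 - 3 * O2 (gf arr) hm) := by
  unfold solStep
  have hbody : (fun (acc : List (List Int) × Int × Int) (i : Nat) =>
      let r := solRow arr hm i (acc.2.1, acc.2.2)
      (acc.1 ++ [r.1], r.2))
      = fun acc i =>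
        (acc.1 ++ [(List.range hm).map (fun j => cellA arr i j)],
         acc.2.1 - ∑ j ∈ Finset.range hm, (if blockSum arr i j = 0 then (3:Int) else 0),
         acc.2.2 - ∑ j ∈ Finset.range hm, (if blockSum arr i j = 4 then (3:Int) else 0)) := by
    funext acc i
    show (let r := solRow arr hm i (acc.2.1, acc.2.2); (acc.1 ++ [r.1], r.2)) = _
    rw [solRow_eq]
  rw [hbody, foldl_rows, map_range_sum, map_range_sum]
  have hz : (3:Int) * Z2 (gf arr) hm
      = ∑ i ∈ Finset.range hm, ∑ j ∈ Finset.range hm,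
          (if blockSum arr i j = 0 then (3:Int) else 0) := by
    unfold Z2
    rw [Finset.mul_sum]
    refine Finset.sum_congr rfl fun i _ => ?_
    rw [Finset.mul_sum]
    refine Finset.sum_congr rfl fun j _ => ?_
    rw [blockSum_eq]
    split_ifs <;> ring
  have ho : (3:Int) * O2 (gf arr) hm
      = ∑ i ∈ Finset.range hm, ∑ j ∈ Finset.range hm,
          (if blockSum arr i j = 4 then (3:Int) else 0) := by
    unfold O2
    rw [Finset.mul_sum]
    refine Finset.sum_congr rfl fun i _ => ?_
    rw [Finset.mul_sum]
    refine Finset.sum_congr rfl fun j _ => ?_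
    rw [blockSum_eq]
    split_ifs <;> ring
  rw [← hz, ← ho]
  simp

theorem getD_map_range {b : Type} (n : Nat) (f : Nat → b) (i : Nat) (d : b) (h : i < n) :
    ((List.range n).map f).getD i d = f i := by
  rw [List.getD_eq_getElem _ _ (by simpa using h)]
  simp

theorem gridBridge (arr : List (List Int)) (hm : Nat) (zo : Int × Int) (i j : Nat)
    (hi : i < hm) (hj : j < hm) :
    gf (solStep arr hm zo).1 i j = stepF (gf arr) i j := by
  rw [solStep_eq]
  simp only [gf, gget]
  rw [getD_map_range hm _ i [] hi, getD_map_range hm _ j 0 hj]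
  simp [cellA, stepF, blockSum_eq]


-- ---- congruence and the A-side bridge ----
theorem EqOn_mono (f g : Nat → Nat → Int) (m n : Nat) (h : n ≤ m) (he : EqOn f g m) :
    EqOn f g n := fun i j hi hj => he i j (lt_of_lt_of_le hi h) (lt_of_lt_of_le hj h)

theorem bs_congr (f g : Nat → Nat → Int) (h : Nat) (he : EqOn f g (2*h)) (i j : Nat)
    (hi : i < h) (hj : j < h) : bs f i j = bs g i j := by
  unfold bs
  rw [he _ _ (by omega) (by omega), he _ _ (by omega) (by omega),
      he _ _ (by omega) (by omega), he _ _ (by omega) (by omega)]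

theorem stepF_congr (f g : Nat → Nat → Int) (h : Nat) (he : EqOn f g (2*h)) :
    EqOn (stepF f) (stepF g) h := by
  intro i j hi hj
  unfold stepF
  rw [bs_congr f g h he i j hi hj]

theorem Z2_congr (f g : Nat → Nat → Int) (h : Nat) (he : EqOn f g (2*h)) :
    Z2 f h = Z2 g h := by
  unfold Z2
  refine Finset.sum_congr rfl fun i hi => Finset.sum_congr rfl fun j hj => ?_
  rw [bs_congr f g h he i j (Finset.mem_range.mp hi) (Finset.mem_range.mp hj)]

theorem O2_congr (f g : Nat → Nat → Int) (h : Nat) (he : EqOn f g (2*h)) :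
    O2 f h = O2 g h := by
  unfold O2
  refine Finset.sum_congr rfl fun i hi => Finset.sum_congr rfl fun j hj => ?_
  rw [bs_congr f g h he i j (Finset.mem_range.mp hi) (Finset.mem_range.mp hj)]

theorem loopF_congr (m : Nat) (f g : Nat → Nat → Int) (zo : Int × Int)
    (he : EqOn f g m) : loopF f m zo = loopF g m zo := by
  induction m using Nat.strong_induction_on generalizing f g zo with
  | _ m ih =>
    conv_lhs => rw [loopF]
    conv_rhs => rw [loopF]
    by_cases hm : 1 < m
    · simp only [hm, if_true]
      have h2 : 2 * (m / 2) ≤ m := by omega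
      have he' : EqOn f g (2 * (m / 2)) := EqOn_mono f g m _ h2 he
      rw [Z2_congr f g (m/2) he', O2_congr f g (m/2) he']
      exact ih (m/2) (Nat.div_lt_self (by omega) (by omega)) _ _ _
        (stepF_congr f g (m/2) he')
    · simp [hm]

theorem solLoop_eq (m : Nat) (arr : List (List Int)) (zo : Int × Int) :
    solLoop arr m zo = loopF (gf arr) m zo := by
  induction m using Nat.strong_induction_on generalizing arr zo with
  | _ m ih =>
    rw [solLoop, loopF]
    by_cases hm : 1 < m
    · simp only [hm, if_true]
      rw [ih (m/2) (Nat.div_lt_self (by omega) (by omega))]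
      rw [loopF_congr (m/2) _ (stepF (gf arr)) _
        (fun i j hi hj => gridBridge arr (m/2) zo i j hi hj)]
      rw [solStep_eq]
    · simp [hm]


-- ---- the B-side bridge ----
theorem valB_eq (arr : List (List Int)) : ∀ (t i j : Nat),
    valB arr i j t = (stepF^[t] (gf arr)) i j := by
  intro t
  induction t with
  | zero => intro i j; simp [valB, gf]
  | succ t ih =>
      intro i j
      rw [Function.iterate_succ_apply']
      show (let s := valB arr (2*i) (2*j) t + valB arr (2*i) (2*j+1) t
        + valB arr (2*i+1) (2*j) t + valB arr (2*i+1) (2*j+1) t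
        if s = 0 then 0 else if s = 4 then 1 else -9999999) = _
      rw [ih, ih, ih, ih]
      rfl

theorem foldl_congr' {a b : Type} (l : List a) (f g : b → a → b) (init : b)
    (h : ∀ acc x, f acc x = g acc x) : l.foldl f init = l.foldl g init := by
  induction l generalizing init with
  | nil => rfl
  | cons y t ih => simp only [List.foldl_cons, h]; exact ih _

theorem foldl_pair_sub {a : Type} (l : List a) (e1 e2 : a → Int) (zo : Int × Int) :
    l.foldl (fun c x => (c.1 - e1 x, c.2 - e2 x)) zo
      = (zo.1 - (l.map e1).sum, zo.2 - (l.map e2).sum) := by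
  induction l generalizing zo with
  | nil => simp
  | cons x t ih =>
      simp only [List.foldl_cons, List.map_cons, List.sum_cons]
      rw [ih]
      refine Prod.ext ?_ ?_ <;> (simp only []; ring)

theorem countCells_eq (arr : List (List Int)) (t size : Nat) (zo : Int × Int) :
    countCells arr (t+1) size zo
      = (zo.1 - 3 * Z2 (stepF^[t] (gf arr)) size, zo.2 - 3 * O2 (stepF^[t] (gf arr)) size) := by
  unfold countCells
  have hcell : ∀ (zo : Int × Int) (i j : Nat),
      (let v := valB arr i j (t+1)
       if v = 0 then (zo.1 - 3, zo.2) else if v = 1 then (zo.1, zo.2 - 3) else zo)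
      = (zo.1 - (if bs (stepF^[t] (gf arr)) i j = 0 then (3:Int) else 0),
         zo.2 - (if bs (stepF^[t] (gf arr)) i j = 4 then (3:Int) else 0)) := by
    intro zo i j
    show (if valB arr i j (t+1) = 0 then (zo.1 - 3, zo.2)
          else if valB arr i j (t+1) = 1 then (zo.1, zo.2 - 3) else zo) = _
    rw [valB_eq, Function.iterate_succ_apply']
    show (if stepF (stepF^[t] (gf arr)) i j = 0 then _ else _) = _
    unfold stepF
    split_ifs <;> try (exfalso; omega)
    all_goals refine Prod.ext ?_ ?_ <;> simp only [] <;> ring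
  have hbody : (fun (zo : Int × Int) (i : Nat) =>
      (List.range size).foldl (fun zo j =>
        let v := valB arr i j (t+1)
        if v = 0 then (zo.1 - 3, zo.2) else if v = 1 then (zo.1, zo.2 - 3) else zo) zo)
      = fun zo i =>
        (zo.1 - ∑ j ∈ Finset.range size, (if bs (stepF^[t] (gf arr)) i j = 0 then (3:Int) else 0),
         zo.2 - ∑ j ∈ Finset.range size, (if bs (stepF^[t] (gf arr)) i j = 4 then (3:Int) else 0)) := by
    funext zo i
    rw [foldl_congr' _ _ _ _ (fun zo j => hcell zo i j)]
    rw [foldl_pair_sub, map_range_sum, map_range_sum]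
  rw [hbody]
  have hbody2 : (fun (zo : Int × Int) (i : Nat) =>
      (zo.1 - ∑ j ∈ Finset.range size, (if bs (stepF^[t] (gf arr)) i j = 0 then (3:Int) else 0),
       zo.2 - ∑ j ∈ Finset.range size, (if bs (stepF^[t] (gf arr)) i j = 4 then (3:Int) else 0)))
      = fun zo i => (zo.1 - (fun i => ∑ j ∈ Finset.range size,
          (if bs (stepF^[t] (gf arr)) i j = 0 then (3:Int) else 0)) i,
        zo.2 - (fun i => ∑ j ∈ Finset.range size,
          (if bs (stepF^[t] (gf arr)) i j = 4 then (3:Int) else 0)) i) := rfl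
  rw [hbody2, foldl_pair_sub, map_range_sum, map_range_sum]
  have hz : ∑ i ∈ Finset.range size, ∑ j ∈ Finset.range size,
      (if bs (stepF^[t] (gf arr)) i j = 0 then (3:Int) else 0)
      = 3 * Z2 (stepF^[t] (gf arr)) size := by
    unfold Z2
    rw [Finset.mul_sum]
    refine Finset.sum_congr rfl fun i _ => ?_
    rw [Finset.mul_sum]
    refine Finset.sum_congr rfl fun j _ => ?_
    split_ifs <;> ring
  have ho : ∑ i ∈ Finset.range size, ∑ j ∈ Finset.range size,
      (if bs (stepF^[t] (gf arr)) i j = 4 then (3:Int) else 0)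
      = 3 * O2 (stepF^[t] (gf arr)) size := by
    unfold O2
    rw [Finset.mul_sum]
    refine Finset.sum_congr rfl fun i _ => ?_
    rw [Finset.mul_sum]
    refine Finset.sum_congr rfl fun j _ => ?_
    split_ifs <;> ring
  rw [hz, ho]

theorem countLoop_eq (arr : List (List Int)) :
    ∀ (m t : Nat) (zo : Int × Int),
    countLoop arr (t+1) (m / 2) zo = loopF (stepF^[t] (gf arr)) m zo := by
  intro m
  induction m using Nat.strong_induction_on with
  | _ m ih =>
    intro t zo
    rw [countLoop]
    conv_rhs => rw [loopF]
    by_cases hm : 1 < m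
    · have hg : 1 ≤ m / 2 := by omega
      rw [if_pos hg, if_pos hm]
      rw [countCells_eq]
      have hrec := ih (m / 2) (Nat.div_lt_self (by omega) (by omega)) (t+1)
        (zo.1 - 3 * Z2 (stepF^[t] (gf arr)) (m / 2), zo.2 - 3 * O2 (stepF^[t] (gf arr)) (m / 2))
      rw [hrec, Function.iterate_succ_apply']
    · have hg : ¬ (1 ≤ m / 2) := by omega
      rw [if_neg hg, if_neg hm]

-- (all proofs below)
theorem solution_spec : Claim_equal_solution := by
  unfold Claim_equal_solution Spec_solution
  intro arr _ _
  show solution arr = solution_alt arr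
  simp only [solution, solution_alt]
  rw [solLoop_eq]
  have hB := countLoop_eq arr arr.length 0
    ((arr.length : Int) * arr.length - pySum (arr.map pySum), pySum (arr.map pySum))
  rw [Function.iterate_zero, id_eq] at hB
  rw [hB]
  have hsq : ((arr.length : Int))^2 = (arr.length : Int) * arr.length := by ring
  rw [hsq]
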